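-- pv_equiv track=rewrite | github.com/Zhang-gong/Simple-DBMS | optimizer.py | sort_merge_join
-- ===== SOURCE A (Python) =====
-- def sort_merge_join(left_rows, right_rows, left_key: str, right_key: str) -> list[tuple[dict, dict]]:
--     """
--     Perform a sort-merge join between two sets of rows.
--
--     Parameters:
--         left_rows (list[dict]): Rows from the left table.
--         right_rows (list[dict]): Rows from the right table.
--         left_key (str): Join key from the left table.
--         right_key (str): Join key from the right table.
--
--     Returns:
--         list[tuple[dict, dict]]: List of matching (left_row, right_row) tuples.
--     """
--     # Sort both datasets by their join keys
--     left_sorted = sorted(left_rows, key=lambda r: r[left_key])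
--     right_sorted = sorted(right_rows, key=lambda r: r[right_key])
--
--     i = j = 0
--     joined = []
--
--     # Merge-scan through both sorted lists
--     while i < len(left_sorted) and j < len(right_sorted):
--         lv = left_sorted[i][left_key]
--         rv = right_sorted[j][right_key]
--
--         if lv == rv:
--             # Emit all matching pairs for this key
--             temp_j = j
--             while temp_j < len(right_sorted) and right_sorted[temp_j][right_key] == lv:
--                 joined.append((left_sorted[i], right_sorted[temp_j]))
--                 temp_j += 1
--             i += 1
--         elif lv < rv:
--             i += 1
--         else:
--             j += 1
--
--     return joined
-- ===== SOURCE B (Python) =====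
-- def sort_merge_join(left_rows, right_rows, left_key: str, right_key: str) -> list[tuple[dict, dict]]:
--     # Hash-index join: sort both sides (left order fixes emission order, the
--     # right-sorted order fixes each bucket's order), then bucket the right rows
--     # by key value and emit per sorted left row.
--     left_sorted = sorted(left_rows, key=lambda r: r[left_key])
--     right_sorted = sorted(right_rows, key=lambda r: r[right_key])
--
--     index = {}
--     for r in right_sorted:
--         index.setdefault(r[right_key], []).append(r)
--
--     joined = []
--     for l in left_sorted:
--         for r in index.get(l[left_key], []):
--             joined.append((l, r))
--     return joined
-- ===== Notes on version B (the rewrite author's own statement) =====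
-- stated objective: alternative
-- what changed: The two-pointer merge scan with an inner run-rescan loop is replaced by a hash join: right rows (sorted) are bucketed into a dict keyed by join value, and the sorted left rows are emitted against their bucket, producing the identical pair order.
import Mathlib
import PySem

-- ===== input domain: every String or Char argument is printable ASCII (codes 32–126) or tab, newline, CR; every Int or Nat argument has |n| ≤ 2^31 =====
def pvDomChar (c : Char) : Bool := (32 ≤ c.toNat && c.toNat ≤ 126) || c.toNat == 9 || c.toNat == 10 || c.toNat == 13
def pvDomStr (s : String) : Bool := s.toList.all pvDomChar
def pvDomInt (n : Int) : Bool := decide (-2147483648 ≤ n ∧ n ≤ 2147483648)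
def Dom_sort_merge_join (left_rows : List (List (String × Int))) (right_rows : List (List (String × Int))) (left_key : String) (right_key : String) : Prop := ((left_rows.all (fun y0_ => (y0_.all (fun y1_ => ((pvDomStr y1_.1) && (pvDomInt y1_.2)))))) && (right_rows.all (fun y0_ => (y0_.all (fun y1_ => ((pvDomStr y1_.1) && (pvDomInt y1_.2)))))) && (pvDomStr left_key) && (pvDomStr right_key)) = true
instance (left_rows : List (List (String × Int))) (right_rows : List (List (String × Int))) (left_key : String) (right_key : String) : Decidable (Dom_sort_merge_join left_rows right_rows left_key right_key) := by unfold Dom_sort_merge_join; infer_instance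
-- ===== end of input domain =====

-- ===== PORT A =====
-- B replaces A's two-pointer merge scan by a hash-bucket join over the same sorted lists (alternative algorithm, identical output order).
-- Shared helper: Python's r[key] on a row dict (first match; Pre_ guarantees presence and unique keys).
def pvRowGet (r : List (String × Int)) (k : String) : Int := (r.lookup k).getD 0

-- inner 'while temp_j < len(right_sorted) and right_sorted[temp_j][right_key] == lv' loop of A
def pvEmitRun (l : List (String × Int)) (rs : List (List (String × Int))) (right_key : String) (lv : Int) (tj : Nat) : List ((List (String × Int)) × (List (String × Int))) :=
  if h : tj < rs.length then
    if pvRowGet rs[tj] right_key = lv then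
      (l, rs[tj]) :: pvEmitRun l rs right_key lv (tj + 1)
    else []
  else []
termination_by rs.length - tj

-- outer merge loop of A over indices i, j
def pvMergeLoop (ls rs : List (List (String × Int))) (left_key right_key : String) (i j : Nat) : List ((List (String × Int)) × (List (String × Int))) :=
  if hi : i < ls.length then
    if hj : j < rs.length then
      if pvRowGet ls[i] left_key = pvRowGet rs[j] right_key then
        pvEmitRun ls[i] rs right_key (pvRowGet ls[i] left_key) j ++ pvMergeLoop ls rs left_key right_key (i + 1) j
      else if pvRowGet ls[i] left_key < pvRowGet rs[j] right_key then
        pvMergeLoop ls rs left_key right_key (i + 1) j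
      else
        pvMergeLoop ls rs left_key right_key i (j + 1)
    else []
  else []
termination_by (ls.length - i) + (rs.length - j)

def sort_merge_join (left_rows : List (List (String × Int))) (right_rows : List (List (String × Int))) (left_key : String) (right_key : String) : List ((List (String × Int)) × (List (String × Int))) :=
  let left_sorted := PySem.List.sorted left_rows (fun r => pvRowGet r left_key) false
  let right_sorted := PySem.List.sorted right_rows (fun r => pvRowGet r right_key) false
  pvMergeLoop left_sorted right_sorted left_key right_key 0 0

-- ===== PORT B =====
def sort_merge_join_alt (left_rows : List (List (String × Int))) (right_rows : List (List (String × Int))) (left_key : String) (right_key : String) : List ((List (String × Int)) × (List (String × Int))) :=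
  let left_sorted := PySem.List.sorted left_rows (fun r => pvRowGet r left_key) false
  let right_sorted := PySem.List.sorted right_rows (fun r => pvRowGet r right_key) false
  -- index.setdefault(r[right_key], []).append(r)
  let index : PySem.Dict Int (List (List (String × Int))) :=
    right_sorted.foldl (fun d r => d.modify (pvRowGet r right_key) [] (fun b => b ++ [r])) PySem.Dict.empty
  -- for l in left_sorted: for r in index.get(lv, []): joined.append((l, r))
  left_sorted.foldl (fun acc l => (index.getD (pvRowGet l left_key) []).foldl (fun acc2 r => acc2 ++ [(l, r)]) acc) []

-- ===== PRECONDITION & SPEC =====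
-- Pre_ excludes inputs where Python A raises KeyError (a row missing its join key), and rows whose
-- association list has duplicate keys, which do not represent a Python dict.
def Pre_sort_merge_join (left_rows : List (List (String × Int))) (right_rows : List (List (String × Int))) (left_key : String) (right_key : String) : Prop :=
  (∀ row ∈ left_rows, (row.map Prod.fst).Nodup ∧ (row.lookup left_key).isSome = true) ∧
  (∀ row ∈ right_rows, (row.map Prod.fst).Nodup ∧ (row.lookup right_key).isSome = true)
instance (left_rows : List (List (String × Int))) (right_rows : List (List (String × Int))) (left_key : String) (right_key : String) : Decidable (Pre_sort_merge_join left_rows right_rows left_key right_key) := by unfold Pre_sort_merge_join; infer_instance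

def pvWitness_sort_merge_join : (List (List (String × Int))) × (List (List (String × Int))) × String × String :=
  ([[("a", 2)], [("a", 1)]], [[("b", 1)], [("b", 1)], [("b", 3)]], "a", "b")

def Spec_sort_merge_join (left_rows : List (List (String × Int))) (right_rows : List (List (String × Int))) (left_key : String) (right_key : String) (out : List ((List (String × Int)) × (List (String × Int)))) : Prop := out = sort_merge_join_alt left_rows right_rows left_key right_key
instance (left_rows : List (List (String × Int))) (right_rows : List (List (String × Int))) (left_key : String) (right_key : String) (out : List ((List (String × Int)) × (List (String × Int)))) : Decidable (Spec_sort_merge_join left_rows right_rows left_key right_key out) := by unfold Spec_sort_merge_join; infer_instance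

-- ===== CLAIM (what is proved, stated in full; the proofs are below) =====
def Claim_equal_sort_merge_join : Prop := ∀ (left_rows : List (List (String × Int))) (right_rows : List (List (String × Int))) (left_key : String) (right_key : String), Dom_sort_merge_join left_rows right_rows left_key right_key → Pre_sort_merge_join left_rows right_rows left_key right_key → Spec_sort_merge_join left_rows right_rows left_key right_key (sort_merge_join left_rows right_rows left_key right_key)

-- ===== LEMMAS AND PROOFS =====

-- A's inner run loop collects the takeWhile-run of equal keys starting at index tj.
lemma pvEmitRun_eq (l : List (String × Int)) (rs : List (List (String × Int))) (rk : String) (lv : Int) :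
    ∀ n tj, rs.length - tj ≤ n →
      pvEmitRun l rs rk lv tj
        = ((rs.drop tj).takeWhile (fun r => pvRowGet r rk == lv)).map (fun r => (l, r)) := by
  intro n
  induction n with
  | zero =>
    intro tj h
    rw [pvEmitRun, dif_neg (by omega), List.drop_eq_nil_of_le (by omega)]
    rfl
  | succ n ih =>
    intro tj h
    rw [pvEmitRun]
    by_cases htj : tj < rs.length
    · rw [dif_pos htj, List.drop_eq_getElem_cons htj, List.takeWhile_cons]
      by_cases hk : pvRowGet rs[tj] rk = lv
      · simp only [hk, BEq.rfl, ite_true, List.map_cons]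
        rw [ih (tj + 1) (by omega)]
      · simp [hk]
    · rw [dif_neg htj, List.drop_eq_nil_of_le (by omega)]
      rfl

-- On a key-sorted list bounded below by lv, filtering for key lv is the initial run.
lemma filter_eq_takeWhile_of_sorted (key : List (String × Int) → Int) (lv : Int) :
    ∀ xs : List (List (String × Int)), xs.Pairwise (fun a b => key a ≤ key b) →
      (∀ x ∈ xs, lv ≤ key x) →
      xs.filter (fun x => key x == lv) = xs.takeWhile (fun x => key x == lv) := by
  intro xs
  induction xs with
  | nil => intro _ _; rfl
  | cons x xs ih =>
    intro hp hlb
    rw [List.pairwise_cons] at hp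
    by_cases hk : key x = lv
    · rw [List.filter_cons, List.takeWhile_cons]
      simp only [hk, BEq.rfl, ite_true]
      rw [ih hp.2 (fun y hy => hk ▸ hp.1 y hy)]
    · have hlt : lv < key x := lt_of_le_of_ne (hlb x List.mem_cons_self) (fun e => hk e.symm)
      rw [List.filter_cons, List.takeWhile_cons]
      simp only [beq_iff_eq, hk, ite_false]
      rw [List.filter_eq_nil_iff.mpr]
      intro y hy
      simp only [beq_iff_eq]
      exact fun e => absurd (e ▸ hp.1 y hy) (by omega)

-- Main invariant: the merge from (i, j) emits exactly, for each remaining left row in order,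
-- all right rows (of the FULL right list) with equal key, provided the skipped right prefix
-- is strictly below every remaining left key.
lemma pvMergeLoop_eq (ls rs : List (List (String × Int))) (lk rk : String)
    (hls : ls.Pairwise (fun a b => pvRowGet a lk ≤ pvRowGet b lk))
    (hrs : rs.Pairwise (fun a b => pvRowGet a rk ≤ pvRowGet b rk)) :
    ∀ n i j, ls.length - i + (rs.length - j) ≤ n →
      (∀ r ∈ rs.take j, ∀ l ∈ ls.drop i, pvRowGet r rk < pvRowGet l lk) →
      pvMergeLoop ls rs lk rk i j
        = (ls.drop i).flatMap (fun l => (rs.filter (fun r => pvRowGet r rk == pvRowGet l lk)).map (fun r => (l, r))) := by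
  intro n
  induction n with
  | zero =>
    intro i j h hinv
    rw [pvMergeLoop, dif_neg (by omega : ¬ i < ls.length), List.drop_eq_nil_of_le (by omega)]
    rfl
  | succ n ih =>
    intro i j h hinv
    rw [pvMergeLoop]
    by_cases hi : i < ls.length
    · rw [dif_pos hi]
      have hdl : ls.drop i = ls[i] :: ls.drop (i + 1) := List.drop_eq_getElem_cons hi
      have hmemI : ls[i] ∈ ls.drop i := by rw [hdl]; exact List.mem_cons_self
      have hLlo : ∀ l ∈ ls.drop i, pvRowGet ls[i] lk ≤ pvRowGet l lk := by
        have hp := hls.drop (i := i)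
        rw [hdl, List.pairwise_cons] at hp
        intro l hl
        rw [hdl, List.mem_cons] at hl
        rcases hl with rfl | hl
        · exact le_refl _
        · exact hp.1 l hl
      have htakej : ∀ r ∈ rs.take j, pvRowGet r rk < pvRowGet ls[i] lk :=
        fun r hr => hinv r hr ls[i] hmemI
      have hinv' : ∀ r ∈ rs.take j, ∀ l ∈ ls.drop (i + 1), pvRowGet r rk < pvRowGet l lk :=
        fun r hr l hl => hinv r hr l (by rw [hdl]; exact List.mem_cons_of_mem _ hl)
      by_cases hj : j < rs.length
      · rw [dif_pos hj]
        have hdr : rs.drop j = rs[j] :: rs.drop (j + 1) := List.drop_eq_getElem_cons hj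
        have hRlo : ∀ r ∈ rs.drop j, pvRowGet rs[j] rk ≤ pvRowGet r rk := by
          have hp := hrs.drop (i := j)
          rw [hdr, List.pairwise_cons] at hp
          intro r hr
          rw [hdr, List.mem_cons] at hr
          rcases hr with rfl | hr
          · exact le_refl _
          · exact hp.1 r hr
        by_cases h1 : pvRowGet ls[i] lk = pvRowGet rs[j] rk
        · rw [if_pos h1]
          have hfilter : rs.filter (fun r => pvRowGet r rk == pvRowGet ls[i] lk)
              = (rs.drop j).takeWhile (fun r => pvRowGet r rk == pvRowGet ls[i] lk) := by
            conv_lhs => rw [← List.take_append_drop j rs]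
            rw [List.filter_append, List.filter_eq_nil_iff.mpr ?side, List.nil_append]
            case side =>
              intro r hr
              simp only [beq_iff_eq]
              exact fun e => absurd (htakej r hr) (by rw [e]; exact lt_irrefl _)
            exact filter_eq_takeWhile_of_sorted (fun r => pvRowGet r rk) _ _ (hrs.drop (i := j))
              (by
                intro x hx
                rw [hdr, List.mem_cons] at hx
                rcases hx with rfl | hx
                · exact le_of_eq h1
                · exact le_trans (le_of_eq h1) (hRlo x (by rw [hdr]; exact List.mem_cons_of_mem _ hx)))
          rw [pvEmitRun_eq ls[i] rs rk _ rs.length j (by omega),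
            ih (i + 1) j (by omega) hinv', hdl, List.flatMap_cons, hfilter]
        · rw [if_neg h1]
          by_cases h2 : pvRowGet ls[i] lk < pvRowGet rs[j] rk
          · rw [if_pos h2]
            have hnil : rs.filter (fun r => pvRowGet r rk == pvRowGet ls[i] lk) = [] := by
              rw [← List.take_append_drop j rs, List.filter_append,
                List.filter_eq_nil_iff.mpr ?p1, List.filter_eq_nil_iff.mpr ?p2, List.nil_append]
              case p1 =>
                intro r hr
                simp only [beq_iff_eq]
                exact fun e => absurd (htakej r hr) (by rw [e]; exact lt_irrefl _)
              case p2 =>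
                intro r hr
                simp only [beq_iff_eq]
                have := hRlo r hr
                omega
            rw [ih (i + 1) j (by omega) hinv', hdl, List.flatMap_cons, hnil]
            simp
          · rw [if_neg h2]
            have h3 : pvRowGet rs[j] rk < pvRowGet ls[i] lk := by omega
            refine ih i (j + 1) (by omega) ?_
            intro r hr l hl
            rw [List.take_add_one, List.getElem?_eq_getElem hj] at hr
            rcases List.mem_append.mp hr with hr | hr
            · exact hinv r hr l hl
            · rw [Option.toList_some, List.mem_singleton] at hr
              subst hr
              exact lt_of_lt_of_le h3 (hLlo l hl)
      · rw [dif_neg hj]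
        rw [eq_comm, List.flatMap_eq_nil_iff]
        intro l hl
        rw [List.map_eq_nil_iff, List.filter_eq_nil_iff]
        intro r hr
        have hr' : r ∈ rs.take j := by rw [List.take_of_length_le (by omega)]; exact hr
        have := hinv r hr' l hl
        simp only [beq_iff_eq]
        omega
    · rw [dif_neg hi, List.drop_eq_nil_of_le (by omega)]
      rfl

-- The dict bucket for value v is the filter of the right list for key v, in list order.
lemma pvBucket_eq (rs : List (List (String × Int))) (rk : String) (v : Int) :
    (rs.foldl (fun d r => d.modify (pvRowGet r rk) [] (fun b => b ++ [r])) PySem.Dict.empty).getD v []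
      = rs.filter (fun r => pvRowGet r rk == v) := by
  have hmap : rs.foldl (fun d r => d.modify (pvRowGet r rk) [] (fun b => b ++ [r])) PySem.Dict.empty
      = (rs.map (fun r => (pvRowGet r rk, r))).foldl (fun d p => d.modify p.1 [] (fun b => b ++ [p.2])) PySem.Dict.empty := by
    rw [List.foldl_map]
  rw [hmap, PySem.Dict.getD_foldl_modify_append, PySem.Dict.getD_empty, List.filter_map, List.map_map]
  simp [Function.comp_def]

-- ===== VERDICT (by name: the statement is the Claim_ definition above) =====
theorem sort_merge_join_spec : Claim_equal_sort_merge_join := by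
  intro left_rows right_rows left_key right_key _ _
  unfold Spec_sort_merge_join sort_merge_join sort_merge_join_alt
  simp only []
  set ls := PySem.List.sorted left_rows (fun r => pvRowGet r left_key) false with hls
  set rs := PySem.List.sorted right_rows (fun r => pvRowGet r right_key) false with hrs
  have hB : ∀ (acc : List ((List (String × Int)) × (List (String × Int)))),
      ls.foldl (fun acc l => ((rs.foldl (fun d r => d.modify (pvRowGet r right_key) [] (fun b => b ++ [r])) PySem.Dict.empty).getD (pvRowGet l left_key) []).foldl (fun acc2 r => acc2 ++ [(l, r)]) acc) acc
        = acc ++ ls.flatMap (fun l => (rs.filter (fun r => pvRowGet r right_key == pvRowGet l left_key)).map (fun r => (l, r))) := by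
    intro acc
    have h1 : (fun (acc : List ((List (String × Int)) × (List (String × Int)))) l =>
        ((rs.foldl (fun d r => d.modify (pvRowGet r right_key) [] (fun b => b ++ [r])) PySem.Dict.empty).getD (pvRowGet l left_key) []).foldl (fun acc2 r => acc2 ++ [(l, r)]) acc)
        = fun acc l => acc ++ (rs.filter (fun r => pvRowGet r right_key == pvRowGet l left_key)).map (fun r => (l, r)) := by
      funext acc l
      rw [PySem.List.foldl_append_singleton_eq_map, pvBucket_eq]
    rw [h1, PySem.List.foldl_append_eq_flatMap]
  rw [hB []]
  rw [pvMergeLoop_eq ls rs left_key right_key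
    (PySem.List.sorted_pairwise left_rows _)
    (PySem.List.sorted_pairwise right_rows _)
    (ls.length + rs.length) 0 0 (by omega) (by simp)]
  simp
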